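-- pv_equiv track=rewrite | github.com/alexandraback/datacollection | solutions_5753053697277952_0/Python/paimon/first.py | solve
-- ===== SOURCE A (Python) =====
-- from string import ascii_uppercase as letters
--
-- def solve(l):
--     s = sum(l)
--     result = []
--     indices = range(len(l))
--     while s > 0:
--         i = max(indices, key=lambda i: l[i])
--         l[i] -= 1
--         s -= 1
--         result.append(letters[i])
--         i = max(indices, key=lambda i: l[i])
--         if l[i] <= s - l[i]:
--             result.append(' ')
--     return ''.join(result)
-- ===== SOURCE B (Python) =====
-- from string import ascii_uppercase as letters
--
-- def _insert(pairs, p):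
--     # insert p into the ascending-sorted list 'pairs', before the first element not < p
--     k = 0
--     while k < len(pairs) and pairs[k] < p:
--         k += 1
--     pairs.insert(k, p)
--
-- def solve(l):
--     # NOTE: unlike the original, this does not mutate l; return value is identical
--     s = sum(l)
--     pairs = sorted((-c, i) for i, c in enumerate(l))
--     out = []
--     while s > 0:
--         nc, i = pairs.pop(0)
--         out.append(letters[i])
--         s -= 1
--         _insert(pairs, (nc + 1, i))
--         top = -pairs[0][0]
--         if top <= s - top:
--             out.append(' ')
--     return ''.join(out)
-- ===== Notes on version B (the rewrite author's own statement) =====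
-- stated objective: alternative
-- what changed: Replaces A's two full max-scans over all indices per emitted letter with a sorted list of (-count, index) pairs maintained by pop-head and ordered re-insertion (the space test peeks at the new head instead of re-scanning); B does not mutate l in place.
import Mathlib
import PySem

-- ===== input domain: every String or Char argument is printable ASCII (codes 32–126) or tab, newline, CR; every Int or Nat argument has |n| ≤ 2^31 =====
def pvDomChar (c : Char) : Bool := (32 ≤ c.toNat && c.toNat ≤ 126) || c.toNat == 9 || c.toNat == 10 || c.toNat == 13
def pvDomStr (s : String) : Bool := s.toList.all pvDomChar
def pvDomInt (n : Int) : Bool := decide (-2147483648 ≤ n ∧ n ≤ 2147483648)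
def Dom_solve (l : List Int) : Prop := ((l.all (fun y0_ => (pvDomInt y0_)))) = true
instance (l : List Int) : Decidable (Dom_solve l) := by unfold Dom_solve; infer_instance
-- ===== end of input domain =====

-- B replaces A's two max-scans per emitted letter by a sorted list of (-count, index) pairs
-- maintained by insertion (pop the head, re-insert the decremented pair); return value is
-- identical, but B does not mutate its argument l in place as A does (return-value equivalence only).

-- string.ascii_uppercase (the module-level constant `letters` both versions import)
def lettersPy : List Char :=
  ['A','B','C','D','E','F','G','H','I','J','K','L','M','N','O','P','Q','R','S','T','U','V','W','X','Y','Z']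

-- ===== PORT A =====
-- the loop body; fuel = initial s.toNat (s drops by exactly 1 per iteration)
def loopA : Nat → List Int → Int → List Char → List Char
  | 0, _, _, acc => acc
  | fuel + 1, l, s, acc =>
    if s ≤ 0 then acc else
      -- i = max(indices, key=lambda i: l[i]); none = ValueError on empty range (unreachable: s > 0 ⇒ l ≠ [])
      match PySem.List.max? (PySem.List.pyRange 0 (l.length : Int) 1) (fun i => PySem.List.pyGetD l i 0) with
      | none => acc
      | some i =>
        let l' := l.set i.toNat (PySem.List.pyGetD l i 0 - 1)   -- l[i] -= 1
        let s' := s - 1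
        -- letters[i]: Python raises IndexError when i ≥ 26; those inputs are excluded by Pre_solve
        let acc1 := acc ++ [(PySem.List.pyGet? lettersPy i).getD ' ']
        let acc2 :=
          match PySem.List.max? (PySem.List.pyRange 0 (l'.length : Int) 1) (fun j => PySem.List.pyGetD l' j 0) with
          | none => acc1
          | some j =>
            if PySem.List.pyGetD l' j 0 ≤ s' - PySem.List.pyGetD l' j 0 then acc1 ++ [' '] else acc1
        loopA fuel l' s' acc2

def solve (l : List Int) : String :=
  String.ofList (loopA l.sum.toNat l l.sum [])

-- ===== PORT B =====
-- Python tuple comparison `p < q` on (int, int) pairs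
def pairLt (p q : Int × Int) : Bool := p.1 < q.1 || (p.1 == q.1 && p.2 < q.2)

-- _insert: insert p into the ascending-sorted list before the first element not < p
def insertPair (p : Int × Int) : List (Int × Int) → List (Int × Int)
  | [] => [p]
  | q :: rest => if pairLt q p then q :: insertPair p rest else p :: q :: rest

def loopB : Nat → List (Int × Int) → Int → List Char → List Char
  | 0, _, _, acc => acc
  | fuel + 1, pairs, s, acc =>
    if s ≤ 0 then acc else
      match pairs with
      | [] => acc   -- unreachable (s > 0 forces a nonempty list); Python would raise IndexError
      | (nc, i) :: rest =>
        let acc1 := acc ++ [(PySem.List.pyGet? lettersPy i).getD ' ']   -- letters[i], as in port A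
        let s' := s - 1
        let pairs' := insertPair (nc + 1, i) rest
        let top := -(pairs'.headD (0, 0)).1
        let acc2 := if top ≤ s' - top then acc1 ++ [' '] else acc1
        loopB fuel pairs' s' acc2

def solve_alt (l : List Int) : String :=
  let s := l.sum
  -- sorted((-c, i) for i, c in enumerate(l)): tuple sort = sorted2 on the two components
  let pairs := PySem.List.sorted2 ((PySem.List.enumerate l 0).map (fun ic => (-ic.2, ic.1)))
    (fun p => p.1) (fun p => p.2) false
  String.ofList (loopB s.toNat pairs s [])

-- ===== PRECONDITION & SPEC =====
-- max of l[26:] (0 when that slice is empty; only used under l.length > 26)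
def tailMax (l : List Int) : Int := match l.drop 26 with | [] => 0 | x :: r => r.foldl max x

-- Pre_solve is EXACTLY the set of inputs where A returns normally (verified empirically; the
-- equivalence proof itself holds for the total ports on all inputs and does not need Pre_solve,
-- which only marks where port A models Python A faithfully — outside it Python A raises): A raises IndexError at letters[i]
-- iff some index ≥ 26 (beyond 'Z') is ever picked, which happens iff l is longer than 26, the max M2
-- of l[26:] is positive, and sum(l) is large enough to grind the first 26 counters down to M2 - 1
-- (excess sum + number of entries ≥ M2, plus one more step).
def Pre_solve (l : List Int) : Prop :=
  l.length ≤ 26 ∨ tailMax l ≤ 0 ∨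
    l.sum < ((l.take 26).map (fun c => max (c - tailMax l) 0)).sum
            + (((l.take 26).filter (fun c => tailMax l ≤ c)).length : Int) + 1
instance (l : List Int) : Decidable (Pre_solve l) := by unfold Pre_solve; infer_instance

def pvWitness_solve : List Int := [3, 1, 2]

def Spec_solve (l : List Int) (out : String) : Prop := out = solve_alt l
instance (l : List Int) (out : String) : Decidable (Spec_solve l out) := by unfold Spec_solve; infer_instance

-- ===== CLAIM (what is proved, stated in full; the proofs are below) =====
def Claim_equal_solve : Prop := ∀ (l : List Int), Dom_solve l → Pre_solve l → Spec_solve l (solve l)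

-- ===== LEMMAS AND PROOFS =====

-- the sorted-pair view of the counter list: (-l[j], j) for j = 0 .. len l - 1
def pairsOf (l : List Int) : List (Int × Int) :=
  (PySem.List.pyRange 0 (l.length : Int) 1).map (fun j => (-(PySem.List.pyGetD l j 0), j))

-- the (total, antisymmetric) lexicographic ≤ on pairs that insertPair sorts by
def Rle (p q : Int × Int) : Prop := p.1 < q.1 ∨ (p.1 = q.1 ∧ p.2 ≤ q.2)

theorem rle_trans {p q r : Int × Int} (h1 : Rle p q) (h2 : Rle q r) : Rle p r := by
  unfold Rle at *; omega

theorem rle_of_not_pairLt {p q : Int × Int} (h : ¬ pairLt q p = true) : Rle p q := by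
  simp [pairLt] at h; unfold Rle; omega

theorem rle_of_pairLt {p q : Int × Int} (h : pairLt p q = true) : Rle p q := by
  simp [pairLt] at h; unfold Rle; omega

theorem insertPair_perm (p : Int × Int) : ∀ ps, List.Perm (insertPair p ps) (p :: ps) := by
  intro ps
  induction ps with
  | nil => simp [insertPair]
  | cons q rest ih =>
    by_cases h : pairLt q p = true
    · simpa [insertPair, h] using ((ih.cons q).trans (List.Perm.swap p q rest))
    · simp [insertPair, h]

theorem insertPair_pairwise (p : Int × Int) :
    ∀ ps, ps.Pairwise Rle → (insertPair p ps).Pairwise Rle := by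
  intro ps
  induction ps with
  | nil => intro _; simp [insertPair]
  | cons q rest ih =>
    intro h
    rcases List.pairwise_cons.mp h with ⟨hq, hrest⟩
    by_cases hc : pairLt q p = true
    · simp only [insertPair, hc, if_pos]
      refine List.pairwise_cons.mpr ⟨?_, ih hrest⟩
      intro y hy
      rcases List.mem_cons.mp ((insertPair_perm p rest).mem_iff.mp hy) with hy' | hy'
      · exact hy' ▸ rle_of_pairLt hc
      · exact hq y (by simpa using hy')
    · simp only [insertPair, hc, if_neg, Bool.not_eq_true]
      refine List.pairwise_cons.mpr ⟨?_, h⟩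
      intro y hy
      rcases List.mem_cons.mp hy with hy' | hy'
      · exact hy' ▸ rle_of_not_pairLt hc
      · exact rle_trans (rle_of_not_pairLt hc) (hq y hy')

theorem insertPair_ne_nil (p : Int × Int) (ps : List (Int × Int)) : insertPair p ps ≠ [] := by
  cases ps with
  | nil => simp [insertPair]
  | cons q rest => by_cases h : pairLt q p = true <;> simp [insertPair, h]

-- first-maximum property of Python's max(..., key=...) fold, over a strictly increasing index list
theorem foldl_max_first (key : Int → Int) :
    ∀ (xs : List Int) (a r : Int), xs.Pairwise (· < ·) → (∀ y ∈ xs, a < y) →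
    PySem.List.max? (a :: xs) key = some r →
    (r = a ∨ r ∈ xs) ∧ key a ≤ key r ∧ (∀ y ∈ xs, key y ≤ key r) ∧
      (a < r → key a < key r) ∧ (∀ y ∈ xs, y < r → key y < key r) := by
  intro xs
  induction xs with
  | nil =>
    intro a r _ _ h
    simp only [PySem.List.max?, List.foldl_cons, List.foldl_nil, Option.some.injEq] at h
    subst h
    refine ⟨Or.inl rfl, le_refl _, by simp, by omega, by simp⟩
  | cons x rest ih =>
    intro a r hpw hlt hfold
    rcases List.pairwise_cons.mp hpw with ⟨hx, hrest⟩
    have hax : a < x := hlt x (by simp)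
    have hfold' : PySem.List.max? ((if key a < key x then x else a) :: rest) key = some r := by
      simpa [PySem.List.max?, apply_ite] using hfold
    clear hfold
    by_cases hk : key a < key x
    · rw [if_pos hk] at hfold'
      have := ih x r hrest hx hfold'
      rcases this with ⟨hmem, hle, hall, hstrict, hfirst⟩
      refine ⟨?_, ?_, ?_, ?_, ?_⟩
      · rcases hmem with h | h
        · exact Or.inr (by simp [h])
        · exact Or.inr (by simp [h])
      · exact le_of_lt (lt_of_lt_of_le hk hle)
      · intro y hy
        rcases List.mem_cons.mp hy with h | h
        · exact h ▸ hle
        · exact hall y h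
      · intro _; exact lt_of_lt_of_le hk hle
      · intro y hy hyr
        rcases List.mem_cons.mp hy with h | h
        · subst h
          rcases hmem with h' | h'
          · omega
          · exact hstrict (hx r h')
        · exact hfirst y h hyr
    · rw [if_neg hk] at hfold'
      have := ih a r hrest (fun y hy => lt_trans hax (hx y hy)) hfold'
      rcases this with ⟨hmem, hle, hall, hstrict, hfirst⟩
      refine ⟨?_, ?_, ?_, ?_, ?_⟩
      · rcases hmem with h | h
        · exact Or.inl h
        · exact Or.inr (by simp [h])
      · exact hle
      · intro y hy
        rcases List.mem_cons.mp hy with h | h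
        · subst h; exact le_trans (le_of_not_gt hk) hle
        · exact hall y h
      · exact hstrict
      · intro y hy hyr
        rcases List.mem_cons.mp hy with h | h
        · subst h
          rcases hmem with h' | h'
          · omega
          · have hxr : y < r := hyr
            have : key y ≤ key a := le_of_not_gt hk
            have : key a < key r := hstrict (by
              have := hx r h'
              omega)
            omega
        · exact hfirst y h hyr

-- characterisation of A's argmax: first index attaining the maximum value
theorem argmax_spec (l : List Int) (hl : l ≠ []) (r : Int)
    (h : PySem.List.max? (PySem.List.pyRange 0 (l.length : Int) 1)
          (fun i => PySem.List.pyGetD l i 0) = some r) :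
    0 ≤ r ∧ r < (l.length : Int) ∧
      (∀ j : Int, 0 ≤ j → j < (l.length : Int) →
        PySem.List.pyGetD l j 0 ≤ PySem.List.pyGetD l r 0) ∧
      (∀ j : Int, 0 ≤ j → j < r →
        PySem.List.pyGetD l j 0 < PySem.List.pyGetD l r 0) := by
  have hn : (0 : Int) < (l.length : Int) := by
    have := List.length_pos_iff.mpr hl
    exact_mod_cast this
  rw [PySem.List.pyRange_one_cons hn] at h
  norm_num at h
  have hfold := foldl_max_first (fun i => PySem.List.pyGetD l i 0)
      (PySem.List.pyRange 1 (l.length : Int) 1) 0 r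
      (PySem.List.pairwise_lt_pyRange_one 1 (l.length : Int))
      (fun y hy => (PySem.List.mem_pyRange_one.mp hy).1) h
  rcases hfold with ⟨hmem, hle, hall, hstrict, hfirst⟩
  have hr0 : 0 ≤ r := by
    rcases hmem with h' | h'
    · omega
    · have := (PySem.List.mem_pyRange_one.mp h').1; omega
  have hrn : r < (l.length : Int) := by
    rcases hmem with h' | h'
    · omega
    · exact (PySem.List.mem_pyRange_one.mp h').2
  refine ⟨hr0, hrn, ?_, ?_⟩
  · intro j hj1 hj2
    rcases eq_or_lt_of_le hj1 with h' | h'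
    · exact h' ▸ hle
    · exact hall j (PySem.List.mem_pyRange_one.mpr ⟨h', hj2⟩)
  · intro j hj1 hj2
    rcases eq_or_lt_of_le hj1 with h' | h'
    · exact h' ▸ hstrict (by omega)
    · exact hfirst j (PySem.List.mem_pyRange_one.mpr ⟨h', by omega⟩) hj2

theorem argmax_some (l : List Int) (hl : l ≠ []) :
    ∃ r, PySem.List.max? (PySem.List.pyRange 0 (l.length : Int) 1)
          (fun i => PySem.List.pyGetD l i 0) = some r := by
  cases h : PySem.List.max? (PySem.List.pyRange 0 (l.length : Int) 1)
      (fun i => PySem.List.pyGetD l i 0) with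
  | none =>
    exfalso
    have hnil : PySem.List.pyRange 0 (l.length : Int) 1 = [] := by
      simpa [pysem] using h
    have hlen := congrArg List.length hnil
    simp [PySem.List.length_pyRange_one] at hlen
    exact hl (List.eq_nil_of_length_eq_zero (by simpa using hlen))
  | some r => exact ⟨r, rfl⟩

-- elements of pairsOf
theorem mem_pairsOf {l : List Int} {y : Int × Int} :
    y ∈ pairsOf l ↔ ∃ j : Int, 0 ≤ j ∧ j < (l.length : Int) ∧
      y = (-(PySem.List.pyGetD l j 0), j) := by
  unfold pairsOf
  simp only [List.mem_map, PySem.List.mem_pyRange_one]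
  constructor
  · rintro ⟨j, ⟨h1, h2⟩, rfl⟩; exact ⟨j, h1, h2, rfl⟩
  · rintro ⟨j, h1, h2, rfl⟩; exact ⟨j, ⟨h1, h2⟩, rfl⟩

theorem getElem_pairsOf {l : List Int} {k : Nat} (hk : k < (pairsOf l).length) :
    (pairsOf l)[k] = (-(PySem.List.pyGetD l (k : Int) 0), (k : Int)) := by
  unfold pairsOf
  have hk' : k < (PySem.List.pyRange 0 (l.length : Int) 1).length := by
    simpa [pairsOf] using hk
  rw [List.getElem_map]
  rw [PySem.List.getElem_pyRange_one]
  simp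

theorem length_pairsOf (l : List Int) : (pairsOf l).length = l.length := by
  simp [pairsOf, PySem.List.length_pyRange_one]

-- head of a sorted permutation of pairsOf l is the pair of A's argmax
theorem head_id {l : List Int} {x : Int × Int} {rest : List (Int × Int)} {r : Int}
    (hpw : (x :: rest).Pairwise Rle) (hperm : List.Perm (x :: rest) (pairsOf l)) (hl : l ≠ [])
    (h : PySem.List.max? (PySem.List.pyRange 0 (l.length : Int) 1)
          (fun i => PySem.List.pyGetD l i 0) = some r) :
    x = (-(PySem.List.pyGetD l r 0), r) := by
  rcases argmax_spec l hl r h with ⟨hr0, hrn, hall, hfirst⟩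
  have hx : x ∈ pairsOf l := hperm.mem_iff.mp (List.mem_cons_self)
  rcases mem_pairsOf.mp hx with ⟨j, hj0, hjn, rfl⟩
  have hy0 : (-(PySem.List.pyGetD l r 0), r) ∈ pairsOf l :=
    mem_pairsOf.mpr ⟨r, hr0, hrn, rfl⟩
  have hy0' := hperm.symm.mem_iff.mp hy0
  rcases List.mem_cons.mp hy0' with heq | hmem
  · exact heq.symm
  · have hrle : Rle (-(PySem.List.pyGetD l j 0), j) (-(PySem.List.pyGetD l r 0), r) :=
      (List.pairwise_cons.mp hpw).1 _ hmem
    have hjle := hall j hj0 hjn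
    unfold Rle at hrle
    simp only at hrle
    have hkeq : PySem.List.pyGetD l j 0 = PySem.List.pyGetD l r 0 := by omega
    have hjr : j = r := by
      by_contra hne
      have hjlt : j < r := by omega
      have := hfirst j hj0 hjlt
      omega
    rw [hkeq, hjr]

theorem pairsOf_set {l : List Int} {r : Int} (hr : 0 ≤ r) (hr2 : r < (l.length : Int)) (v : Int) :
    pairsOf (l.set r.toNat v) = (pairsOf l).set r.toNat (-v, r) := by
  have hrl : r.toNat < l.length := by omega
  apply List.ext_getElem
  · simp [length_pairsOf]
  · intro k h1 h2
    have hkl : k < l.length := by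
      simpa [length_pairsOf] using h1
    rw [getElem_pairsOf h1, List.getElem_set]
    by_cases hk : r.toNat = k
    · subst hk
      have hcast : ((r.toNat : Nat) : Int) = r := Int.toNat_of_nonneg hr
      rw [if_pos rfl, hcast]
      have : PySem.List.pyGetD (l.set r.toNat v) r 0 = v := by
        rw [← hcast, PySem.List.pyGetD_natCast]
        simp only [Int.toNat_natCast]
        rw [List.getD_eq_getElem _ _ (by simpa using hrl)]
        exact List.getElem_set_self _
      rw [this]
    · rw [if_neg hk, getElem_pairsOf (by simpa [length_pairsOf] using hkl)]
      have : PySem.List.pyGetD (l.set r.toNat v) (k : Int) 0 = PySem.List.pyGetD l (k : Int) 0 := by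
        rw [PySem.List.pyGetD_natCast, PySem.List.pyGetD_natCast]
        rw [List.getD_eq_getElem _ _ (by simpa using hkl),
          List.getD_eq_getElem _ _ hkl]
        exact List.getElem_set_ne hk _
      rw [this]

theorem sum_set_int : ∀ (l : List Int) (n : Nat), n < l.length →
    ∀ a : Int, (l.set n a).sum = l.sum - l.getD n 0 + a := by
  intro l
  induction l with
  | nil => intro n h; simp at h
  | cons x rest ih =>
    intro n h a
    cases n with
    | zero => simp [List.set]; ring
    | succ m =>
      simp only [List.set, List.sum_cons, List.getD_cons_succ]
      rw [ih m (by simpa using h) a]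
      ring

-- the central loop invariant: A's counter list and B's sorted pair list evolve in lock step
theorem loop_eq : ∀ (fuel : Nat) (l : List Int) (pairs : List (Int × Int)) (s : Int)
    (acc : List Char), s = l.sum → pairs.Pairwise Rle → List.Perm pairs (pairsOf l) →
    loopA fuel l s acc = loopB fuel pairs s acc := by
  intro fuel
  induction fuel with
  | zero => intro l pairs s acc _ _ _; rfl
  | succ fuel ih =>
    intro l pairs s acc hsum hpw hperm
    by_cases hs : s ≤ 0
    · simp [loopA, loopB, hs]
    · have hs' : 0 < s := by omega
      have hl : l ≠ [] := by
        intro h; subst h; simp at hsum; omega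
      obtain ⟨r, hmax⟩ := argmax_some l hl
      rcases argmax_spec l hl r hmax with ⟨hr0, hrn, _, _⟩
      have hrl : r.toNat < l.length := by omega
      have hcast : ((r.toNat : Nat) : Int) = r := Int.toNat_of_nonneg hr0
      -- pairs is nonempty
      have hlen : pairs.length = l.length := by
        rw [hperm.length_eq, length_pairsOf]
      cases pairs with
      | nil =>
        exfalso
        have : l = [] := by simpa using hlen.symm
        exact hl this
      | cons x rest =>
        have hx : x = (-(PySem.List.pyGetD l r 0), r) := head_id hpw hperm hl hmax
        set c := PySem.List.pyGetD l r 0 with hc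
        -- the updated counter list and pair list
        set l' := l.set r.toNat (c - 1) with hl'def
        have hl'len : l'.length = l.length := by simp [hl'def]
        have hl'ne : l' ≠ [] := by
          intro h
          have := congrArg List.length h
          simp [hl'len] at this
          exact hl this
        set x' : Int × Int := (-(c - 1), r) with hx'
        -- rest is the erased pair list
        have hgetx : (pairsOf l)[r.toNat]'(by simpa [length_pairsOf] using hrl) = x := by
          rw [getElem_pairsOf, hcast, hx]
        have hperm2 : List.Perm (pairsOf l) (x :: (pairsOf l).eraseIdx r.toNat) := by
          have := List.getElem_cons_eraseIdx_perm
            (l := pairsOf l) (n := r.toNat) (by simpa [length_pairsOf] using hrl)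
          rw [hgetx] at this
          exact this.symm
        have hrest : List.Perm rest ((pairsOf l).eraseIdx r.toNat) :=
          (hperm.trans hperm2).cons_inv
        have hpairs' : List.Perm (insertPair x' rest) (pairsOf l') := by
          have h1 : pairsOf l' = (pairsOf l).set r.toNat x' := pairsOf_set hr0 hrn (c - 1)
          have h2 : List.Perm (pairsOf l') (x' :: (pairsOf l).eraseIdx r.toNat) := by
            rw [h1]
            exact List.set_perm_cons_eraseIdx (by simpa [length_pairsOf] using hrl) x'
          exact ((insertPair_perm x' rest).trans ((hrest.cons x').symm.symm)).trans h2.symm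
        have hpw' : (insertPair x' rest).Pairwise Rle :=
          insertPair_pairwise x' rest (List.pairwise_cons.mp hpw).2
        have hsum' : s - 1 = l'.sum := by
          rw [hl'def, sum_set_int l r.toNat hrl (c - 1)]
          have : l.getD r.toNat 0 = c := by
            rw [hc, ← hcast, PySem.List.pyGetD_natCast]
            simp only [Int.toNat_natCast]
          omega
        -- identify the second argmax with the head of the re-sorted pair list
        obtain ⟨r2, hmax2⟩ := argmax_some l' hl'ne
        have hne' : insertPair x' rest ≠ [] := insertPair_ne_nil x' rest
        obtain ⟨y, rest2, hy⟩ : ∃ y rest2, insertPair x' rest = y :: rest2 := by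
          cases hins : insertPair x' rest with
          | nil => exact absurd hins hne'
          | cons y rest2 => exact ⟨y, rest2, rfl⟩
        have hyid : y = (-(PySem.List.pyGetD l' r2 0), r2) := by
          apply head_id (l := l') (rest := rest2) _ _ hl'ne hmax2
          · rw [← hy]; exact hpw'
          · rw [← hy]; exact hpairs'
        subst hyid
        -- now unfold one step of both loops
        simp only [loopA, loopB, if_neg hs, hmax]
        have hc1 : (x.1 + 1, x.2) = x' := by
          rw [hx, hx']
          simp
          omega
        rw [hc1, hy, ← hc, ← hl'def, hmax2]
        have hx2 : x.2 = r := by rw [hx]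
        rw [hx2]
        simp only [List.headD_cons, neg_neg]
        exact ih l' ((-PySem.List.pyGetD l' r2 0, r2) :: rest2) (s - 1) _
          hsum' (hy ▸ hpw') (hy ▸ hpairs')

-- B's initial insertion sort produces a sorted permutation of pairsOf l
-- the strict-lex "goes before" test that sorted2 on the two pair components uses
def beforeLex (a b : Int × Int) : Bool :=
  decide (a.1 < b.1) || (!decide (b.1 < a.1) && decide (a.2 < b.2))

theorem insertBy_lex_perm (x : Int × Int) :
    ∀ ys, (PySem.List.insertBy beforeLex x ys).Perm (x :: ys) := by
  intro ys
  induction ys with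
  | nil => simp [PySem.List.insertBy]
  | cons q rest ih =>
    by_cases h : beforeLex x q = true
    · simp [PySem.List.insertBy, h]
    · simpa [PySem.List.insertBy, h] using ((ih.cons q).trans (List.Perm.swap x q rest))

theorem rle_of_beforeLex {a b : Int × Int} (h : beforeLex a b = true) : Rle a b := by
  simp [beforeLex] at h; unfold Rle; omega

theorem rle_of_not_beforeLex {a b : Int × Int} (h : ¬ beforeLex a b = true) : Rle b a := by
  simp [beforeLex] at h; unfold Rle; omega

theorem insertBy_lex_pairwise (x : Int × Int) :
    ∀ ys, ys.Pairwise Rle → (PySem.List.insertBy beforeLex x ys).Pairwise Rle := by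
  intro ys
  induction ys with
  | nil => intro _; simp [PySem.List.insertBy]
  | cons q rest ih =>
    intro h
    rcases List.pairwise_cons.mp h with ⟨hq, hrest⟩
    by_cases hc : beforeLex x q = true
    · simp only [PySem.List.insertBy, hc, if_pos]
      refine List.pairwise_cons.mpr ⟨?_, h⟩
      intro y hy
      rcases List.mem_cons.mp hy with hy' | hy'
      · exact hy' ▸ rle_of_beforeLex hc
      · exact rle_trans (rle_of_beforeLex hc) (hq y hy')
    · simp only [PySem.List.insertBy, hc, if_neg, Bool.not_eq_true]
      refine List.pairwise_cons.mpr ⟨?_, ih hrest⟩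
      intro y hy
      rcases (PySem.List.mem_insertBy beforeLex x y rest).mp hy with hy' | hy'
      · exact hy' ▸ rle_of_not_beforeLex hc
      · exact hq y hy'

theorem fold_insertBy_pairwise : ∀ (xs ps : List (Int × Int)),
    ps.Pairwise Rle → (xs.foldl (fun acc x => PySem.List.insertBy beforeLex x acc) ps).Pairwise Rle := by
  intro xs
  induction xs with
  | nil => intro ps h; simpa using h
  | cons a xs ih =>
    intro ps h
    simp only [List.foldl_cons]
    exact ih _ (insertBy_lex_pairwise a _ h)

theorem fold_insertBy_perm : ∀ (xs ps : List (Int × Int)),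
    (xs.foldl (fun acc x => PySem.List.insertBy beforeLex x acc) ps).Perm (xs ++ ps) := by
  intro xs
  induction xs with
  | nil => intro ps; simp
  | cons a xs ih =>
    intro ps
    simp only [List.foldl_cons, List.cons_append]
    exact ((ih (PySem.List.insertBy beforeLex a ps)).trans
      (((insertBy_lex_perm a ps).append_left _).trans List.perm_middle))

theorem sorted2_eq_fold (xs : List (Int × Int)) :
    PySem.List.sorted2 xs (fun p => p.1) (fun p => p.2) false
      = xs.foldl (fun acc x => PySem.List.insertBy beforeLex x acc) [] := rfl

theorem map_enumerate_eq_pairsOf (l : List Int) :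
    (PySem.List.enumerate l 0).map (fun ic => (-ic.2, ic.1)) = pairsOf l := by
  rw [PySem.List.enumerate_eq_map_pyRange l 0, pairsOf, List.map_map]
  rfl

theorem init_pairwise (l : List Int) :
    (PySem.List.sorted2 ((PySem.List.enumerate l 0).map (fun ic => (-ic.2, ic.1)))
      (fun p => p.1) (fun p => p.2) false).Pairwise Rle := by
  rw [sorted2_eq_fold]
  exact fold_insertBy_pairwise _ [] (by simp)

theorem init_perm (l : List Int) :
    (PySem.List.sorted2 ((PySem.List.enumerate l 0).map (fun ic => (-ic.2, ic.1)))
      (fun p => p.1) (fun p => p.2) false).Perm (pairsOf l) := by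
  rw [sorted2_eq_fold, map_enumerate_eq_pairsOf]
  have := fold_insertBy_perm (pairsOf l) []
  rw [List.append_nil] at this
  exact this

theorem master (l : List Int) : solve l = solve_alt l := by
  unfold solve solve_alt
  exact congrArg String.ofList
    (loop_eq l.sum.toNat l _ l.sum [] rfl (init_pairwise l) (init_perm l))

-- ===== VERDICT (by name: the statement is the Claim_ definition above) =====
theorem solve_spec : Claim_equal_solve := by
  intro l _ _
  unfold Spec_solve
  exact master l
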